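-- pv_equiv track=rewrite | github.com/maximilianoantico/Sudoku | sudoku.py | obtener_origen_region
-- ===== SOURCE A (Python) =====
-- def obtener_origen_region(fila, columna):
--     '''
--     Devuelve la posición de la celda de la esquina superior izquierda
--     de la región en que se encuentra la celda en (fila, columna).
--
--     Las regiones se agrupan de la siguiente forma:
--    *[0,0] [0,1] [0,2] *[0,3] [0,4] [0,5] *[0,6] [0,7] [0,8]
--     [1,0] [1,1] [1,2]  [1,3] [1,4] [1,5]  [1,6] [1,7] [1,8]
--     [2,0] [2,1] [2,2]  [2,3] [2,4] [2,5]  [2,6] [2,7] [2,8]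
--
--    *[3,0] [3,1] [3,2] *[3,3] [3,4] [3,5] *[3,6] [3,7] [3,8]
--     [4,0] [4,1] [4,2]  [4,3] [4,4] [4,5]  [4,6] [4,7] [4,8]
--     [5,0] [5,1] [5,2]  [5,3] [5,4] [5,5]  [5,6] [5,7] [5,8]
--
--    *[6,0] [6,1] [6,2] *[6,3] [6,4] [6,5] *[6,6] [6,7] [6,8]
--     [7,0] [7,1] [7,2]  [7,3] [7,4] [7,5]  [7,6] [7,7] [7,8]
--     [8,0] [8,1] [8,2]  [8,3] [8,4] [8,5]  [8,6] [8,7] [8,8]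
--
--     Las celdas marcadas con un (*) son las celdas que deberá
--     devolver esta función para la correspondiente región.
--
--     Por ejemplo, para la posición (fila = 1, columna = 4) la función
--     deberá devolver (0, 3).
--     '''
--
--     region_1 = ([0,0], [0,1], [0,2], [1,0], [1,1], [1,2], [2,0], [2,1], [2,2])
--     region_2 = ([0,3], [0,4], [0,5], [1,3], [1,4], [1,5], [2,3], [2,4], [2,5])
--     region_3 = ([0,6], [0,7], [0,8], [1,6], [1,7], [1,8], [2,6], [2,7], [2,8])
--     region_4 = ([3,0], [3,1], [3,2], [4,0], [4,1], [4,2], [5,0], [5,1], [5,2])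
--     region_5 = ([3,3], [3,4], [3,5], [4,3], [4,4], [4,5], [5,3], [5,4], [5,5])
--     region_6 = ([3,6], [3,7], [3,8], [4,6], [4,7], [4,8], [5,6], [5,7], [5,8])
--     region_7 = ([6,0], [6,1], [6,2], [7,0], [7,1], [7,2], [8,0], [8,1], [8,2])
--     region_8 = ([6,3], [6,4], [6,5], [7,3], [7,4], [7,5], [8,3], [8,4], [8,5])
--     region_9 = ([6,6], [6,7], [6,8], [7,6], [7,7], [7,8], [8,6], [8,7], [8,8])
--
--     all_regions = (region_1, region_2, region_3, region_4, region_5, region_6,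
--                    region_7, region_8, region_9)
--     origen = [fila,columna]
--
--     for region in all_regions:
--         for org_reg in region:
--             if org_reg == origen:
--                 return tuple(region[0])
-- ===== SOURCE B (Python) =====
-- def obtener_origen_region(fila, columna):
--     # Closed-form: the region corner is the coordinates rounded down to multiples of 3.
--     if 0 <= fila < 9 and 0 <= columna < 9:
--         return (fila // 3 * 3, columna // 3 * 3)
--     return None
-- ===== Notes on version B (the rewrite author's own statement) =====
-- stated objective: simpler
-- what changed: Replaces the 81-entry table scan over nine hand-written region tuples with the closed-form arithmetic (fila//3*3, columna//3*3) guarded by a range check.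
-- outside the precondition, e.g. on obtener_origen_region(9, 0): A returns None, B returns None; on obtener_origen_region(-1, 4): A returns None, B returns None
import Mathlib
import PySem

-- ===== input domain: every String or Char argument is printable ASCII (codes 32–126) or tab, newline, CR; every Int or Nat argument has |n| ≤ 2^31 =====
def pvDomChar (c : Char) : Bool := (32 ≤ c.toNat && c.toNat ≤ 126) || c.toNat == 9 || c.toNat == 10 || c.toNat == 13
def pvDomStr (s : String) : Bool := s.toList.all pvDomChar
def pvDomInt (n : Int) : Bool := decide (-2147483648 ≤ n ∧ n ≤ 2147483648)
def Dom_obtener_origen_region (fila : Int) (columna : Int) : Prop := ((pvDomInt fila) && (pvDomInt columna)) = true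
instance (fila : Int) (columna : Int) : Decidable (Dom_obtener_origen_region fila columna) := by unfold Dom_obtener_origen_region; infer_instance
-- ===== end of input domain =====

-- B replaces A's 81-entry table scan by the closed form (fila//3*3, columna//3*3) with a range check (objective: simpler).
-- A returns None (no Int × Int value) when (fila, columna) is outside the 9×9 board; Pre_ excludes exactly those inputs.

-- ===== PORT A =====
-- inner loop: for org_reg in region: if org_reg == origen: return tuple(region[0])
def pvScanRegion (origen : Int × Int) (first : Int × Int) : List (Int × Int) → Option (Int × Int)
  | [] => none
  | org_reg :: rest => if org_reg = origen then some first else pvScanRegion origen first rest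

-- outer loop: for region in all_regions
def pvScanRegions (origen : Int × Int) : List (List (Int × Int)) → Option (Int × Int)
  | [] => none
  | region :: rest =>
    match pvScanRegion origen (region.headD (0, 0)) region with
    | some r => some r
    | none => pvScanRegions origen rest

def obtener_origen_region (fila : Int) (columna : Int) : Int × Int :=
  let region_1 : List (Int × Int) := [(0,0), (0,1), (0,2), (1,0), (1,1), (1,2), (2,0), (2,1), (2,2)]
  let region_2 : List (Int × Int) := [(0,3), (0,4), (0,5), (1,3), (1,4), (1,5), (2,3), (2,4), (2,5)]
  let region_3 : List (Int × Int) := [(0,6), (0,7), (0,8), (1,6), (1,7), (1,8), (2,6), (2,7), (2,8)]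
  let region_4 : List (Int × Int) := [(3,0), (3,1), (3,2), (4,0), (4,1), (4,2), (5,0), (5,1), (5,2)]
  let region_5 : List (Int × Int) := [(3,3), (3,4), (3,5), (4,3), (4,4), (4,5), (5,3), (5,4), (5,5)]
  let region_6 : List (Int × Int) := [(3,6), (3,7), (3,8), (4,6), (4,7), (4,8), (5,6), (5,7), (5,8)]
  let region_7 : List (Int × Int) := [(6,0), (6,1), (6,2), (7,0), (7,1), (7,2), (8,0), (8,1), (8,2)]
  let region_8 : List (Int × Int) := [(6,3), (6,4), (6,5), (7,3), (7,4), (7,5), (8,3), (8,4), (8,5)]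
  let region_9 : List (Int × Int) := [(6,6), (6,7), (6,8), (7,6), (7,7), (7,8), (8,6), (8,7), (8,8)]
  let all_regions := [region_1, region_2, region_3, region_4, region_5, region_6,
                      region_7, region_8, region_9]
  let origen := (fila, columna)
  -- Python falls through with None outside the board; Pre_ excludes that, the default (0, 0) is never reached under Pre_
  (pvScanRegions origen all_regions).getD (0, 0)

-- ===== PORT B =====
def obtener_origen_region_alt (fila : Int) (columna : Int) : Int × Int :=
  if 0 ≤ fila ∧ fila < 9 ∧ 0 ≤ columna ∧ columna < 9 then
    (PySem.Int.floordiv fila 3 * 3, PySem.Int.floordiv columna 3 * 3)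
  else
    (0, 0)  -- Python B returns None here; excluded by Pre_

-- ===== PRECONDITION & SPEC =====
-- Pre_ excludes inputs outside the 9×9 board, where Python A (and B) return None, not an int pair.
def Pre_obtener_origen_region (fila : Int) (columna : Int) : Prop :=
  0 ≤ fila ∧ fila < 9 ∧ 0 ≤ columna ∧ columna < 9
instance (fila : Int) (columna : Int) : Decidable (Pre_obtener_origen_region fila columna) := by
  unfold Pre_obtener_origen_region; infer_instance
def pvWitness_obtener_origen_region : Int × Int := (1, 4)

def Spec_obtener_origen_region (fila : Int) (columna : Int) (out : Int × Int) : Prop := out = obtener_origen_region_alt fila columna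
instance (fila : Int) (columna : Int) (out : Int × Int) : Decidable (Spec_obtener_origen_region fila columna out) := by unfold Spec_obtener_origen_region; infer_instance

-- ===== CLAIM (what is proved, stated in full; the proofs are below) =====
def Claim_equal_obtener_origen_region : Prop := ∀ (fila : Int) (columna : Int), Dom_obtener_origen_region fila columna → Pre_obtener_origen_region fila columna → Spec_obtener_origen_region fila columna (obtener_origen_region fila columna)

-- ===== LEMMAS AND PROOFS =====

-- ===== VERDICT (by name: the statement is the Claim_ definition above) =====
theorem obtener_origen_region_spec : Claim_equal_obtener_origen_region := by
  intro fila columna _ hpre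
  obtain ⟨h1, h2, h3, h4⟩ := hpre
  unfold Spec_obtener_origen_region
  interval_cases fila <;> interval_cases columna <;> decide
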